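-- pv_equiv track=rewrite | github.com/Azirqui/FYP-DOCMATE-Replit | code_doc_ai/app/relationship_mapper.py | get_class_hierarchy_depth
-- ===== SOURCE A (Python) =====
-- from typing import List, Dict, Set, Optional, Tuple
--
-- def get_class_hierarchy_depth(class_name: str, inheritance_hierarchy: Dict[str, List[str]], depth: int = 0) -> int:
--     if class_name not in inheritance_hierarchy:
--         return depth
--
--     max_depth = depth
--     for child in inheritance_hierarchy[class_name]:
--         child_depth = get_class_hierarchy_depth(child, inheritance_hierarchy, depth + 1)
--         max_depth = max(max_depth, child_depth)
--
--     return max_depth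
-- ===== SOURCE B (Python) =====
-- def get_class_hierarchy_depth(class_name, inheritance_hierarchy, depth=0):
--     # Memoized DFS: compute each class's subtree height once, answer = depth + height.
--     memo = {}
--
--     def height(node):
--         cached = memo.get(node)
--         if cached is not None:
--             return cached
--         children = inheritance_hierarchy.get(node)
--         if children is None:
--             return 0
--         h = 0
--         for c in children:
--             h = max(h, 1 + height(c))
--         memo[node] = h
--         return h
--
--     return depth + height(class_name)
-- ===== Notes on version B (the rewrite author's own statement) =====
-- stated objective: alternative
-- what changed: B replaces A's naive recursion (which threads the running depth through every recursive call and may re-explore shared ancestor paths) by a memoized DFS that computes each class's pure subtree height at most once and returns depth + height(class_name).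
import Mathlib
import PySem

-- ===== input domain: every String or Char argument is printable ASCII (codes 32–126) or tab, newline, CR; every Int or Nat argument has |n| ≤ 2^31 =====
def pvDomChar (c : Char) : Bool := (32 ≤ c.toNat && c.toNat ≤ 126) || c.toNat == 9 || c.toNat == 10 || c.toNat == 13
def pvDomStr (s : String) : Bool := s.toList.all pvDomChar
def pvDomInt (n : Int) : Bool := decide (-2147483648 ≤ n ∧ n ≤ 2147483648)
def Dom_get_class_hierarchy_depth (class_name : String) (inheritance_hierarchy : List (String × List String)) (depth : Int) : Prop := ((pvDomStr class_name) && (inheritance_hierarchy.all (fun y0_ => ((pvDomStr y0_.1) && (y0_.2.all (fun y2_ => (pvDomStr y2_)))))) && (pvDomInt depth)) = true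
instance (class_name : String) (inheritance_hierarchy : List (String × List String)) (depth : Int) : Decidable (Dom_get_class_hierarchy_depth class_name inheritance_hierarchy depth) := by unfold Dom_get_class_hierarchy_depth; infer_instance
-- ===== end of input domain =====

-- B (get_class_hierarchy_depth_alt) replaces A's depth-threading recursion by a memoized DFS that
-- computes each class's subtree height at most once and returns depth + height (alternative algorithm, same result).

-- ===== PORT A =====
-- Shared dict lookup: first match in the association list (the Python dict's lookup).
def pvLookup : List (String × List String) → String → Option (List String)
  | [], _ => none
  | (k, v) :: rest, n => if k == n then some v else pvLookup rest n

-- Fuel makes A's recursion total in Lean; inside Pre_ the fuel never runs out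
-- (the recursion only follows paths of distinct reachable classes).
def pvGoA (ih : List (String × List String)) : Nat → String → Int → Int
  | 0, _, depth => depth
  | fuel + 1, class_name, depth =>
    match pvLookup ih class_name with
    | none => depth
    | some children =>
      children.foldl (fun max_depth child => max max_depth (pvGoA ih fuel child (depth + 1))) depth

def get_class_hierarchy_depth (class_name : String) (inheritance_hierarchy : List (String × List String)) (depth : Int) : Int :=
  pvGoA inheritance_hierarchy ((inheritance_hierarchy.flatMap (fun e => e.1 :: e.2)).length + 1) class_name depth

-- ===== PORT B =====
-- B computes the pure subtree height of a node once, caching it in a memo dict; answer = depth + height.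
def pvHeightB (ih : List (String × List String)) : Nat → String → PySem.Dict String Int → Int × PySem.Dict String Int
  | 0, _, memo => (0, memo)
  | fuel + 1, node, memo =>
    match memo.get? node with
    | some cached => (cached, memo)
    | none =>
      match pvLookup ih node with
      | none => (0, memo)
      | some children =>
        let r := children.foldl
          (fun (acc : Int × PySem.Dict String Int) c =>
            let s := pvHeightB ih fuel c acc.2
            (max acc.1 (1 + s.1), s.2))
          (0, memo)
        (r.1, r.2.insert node r.1)

def get_class_hierarchy_depth_alt (class_name : String) (inheritance_hierarchy : List (String × List String)) (depth : Int) : Int :=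
  depth + (pvHeightB inheritance_hierarchy ((inheritance_hierarchy.flatMap (fun e => e.1 :: e.2)).length + 1) class_name PySem.Dict.empty).1

-- ===== PRECONDITION & SPEC =====
-- Reachability machinery used by Pre_: children of a class, one expansion step, and the
-- set of classes reachable from a class (enough expansion steps to reach the closure).
def pvCh (ih : List (String × List String)) (n : String) : List String :=
  (((ih.find? (fun e => e.1 == n))).map Prod.snd).getD []

def pvExp (ih : List (String × List String)) (s : List String) : List String :=
  PySem.List.dedup (s ++ s.flatMap (pvCh ih))

def pvN0 (ih : List (String × List String)) : Nat :=
  (ih.flatMap (fun e => e.1 :: e.2)).length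

def pvReach (ih : List (String × List String)) (n : String) : List String :=
  (pvExp ih)^[pvN0 ih + 1] (PySem.List.dedup (pvCh ih n))

-- Pre_ excludes exactly the inputs on which A's recursion never terminates (Python RecursionError):
-- those where some class reachable from class_name lies on an inheritance cycle.
def Pre_get_class_hierarchy_depth (class_name : String) (inheritance_hierarchy : List (String × List String)) (depth : Int) : Prop :=
  ∀ k ∈ (class_name :: pvReach inheritance_hierarchy class_name), k ∉ pvReach inheritance_hierarchy k

instance (class_name : String) (inheritance_hierarchy : List (String × List String)) (depth : Int) : Decidable (Pre_get_class_hierarchy_depth class_name inheritance_hierarchy depth) := by unfold Pre_get_class_hierarchy_depth; infer_instance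

def pvWitness_get_class_hierarchy_depth : String × (List (String × List String)) × Int :=
  ("A", [("A", ["B", "C"]), ("B", ["C"]), ("C", [])], 1)

def Spec_get_class_hierarchy_depth (class_name : String) (inheritance_hierarchy : List (String × List String)) (depth : Int) (out : Int) : Prop := out = get_class_hierarchy_depth_alt class_name inheritance_hierarchy depth
instance (class_name : String) (inheritance_hierarchy : List (String × List String)) (depth : Int) (out : Int) : Decidable (Spec_get_class_hierarchy_depth class_name inheritance_hierarchy depth out) := by unfold Spec_get_class_hierarchy_depth; infer_instance

-- ===== CLAIM (what is proved, stated in full; the proofs are below) =====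
def Claim_equal_get_class_hierarchy_depth : Prop := ∀ (class_name : String) (inheritance_hierarchy : List (String × List String)) (depth : Int), Dom_get_class_hierarchy_depth class_name inheritance_hierarchy depth → Pre_get_class_hierarchy_depth class_name inheritance_hierarchy depth → Spec_get_class_hierarchy_depth class_name inheritance_hierarchy depth (get_class_hierarchy_depth class_name inheritance_hierarchy depth)

-- ===== LEMMAS AND PROOFS =====

-- the universe of strings occurring in the hierarchy
def pvU (ih : List (String × List String)) : List String :=
  ih.flatMap (fun e => e.1 :: e.2)

-- reference height function: pure height of a node, with fuel
def pvHf (ih : List (String × List String)) : Nat → String → Int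
  | 0, _ => 0
  | f + 1, n =>
    match pvLookup ih n with
    | none => 0
    | some cs => cs.foldl (fun a c => max a (1 + pvHf ih f c)) 0

theorem pv_witness_ok : Dom_get_class_hierarchy_depth (pvWitness_get_class_hierarchy_depth.1) (pvWitness_get_class_hierarchy_depth.2.1) (pvWitness_get_class_hierarchy_depth.2.2) ∧ Pre_get_class_hierarchy_depth (pvWitness_get_class_hierarchy_depth.1) (pvWitness_get_class_hierarchy_depth.2.1) (pvWitness_get_class_hierarchy_depth.2.2) := by
  constructor
  · decide
  · decide

theorem pvCh_eq (ih : List (String × List String)) (n : String) :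
    pvCh ih n = (pvLookup ih n).getD [] := by
  induction ih with
  | nil => rfl
  | cons e rest ihr =>
    obtain ⟨k, v⟩ := e
    by_cases hk : k == n
    · simp [pvCh, pvLookup, List.find?, hk]
    · simp only [pvCh, pvLookup, List.find?, hk] at *
      simpa [pvCh] using ihr

theorem pvLookup_mem (ih : List (String × List String)) (n : String) (cs : List String)
    (h : pvLookup ih n = some cs) : (n, cs) ∈ ih := by
  induction ih with
  | nil => simp [pvLookup] at h
  | cons e rest ihr =>
    obtain ⟨k, v⟩ := e
    by_cases hk : k == n
    · simp [pvLookup, hk] at h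
      simp_all
    · simp [pvLookup, hk] at h
      exact List.mem_cons_of_mem _ (ihr h)

theorem pv_ch_sub_U (ih : List (String × List String)) (y x : String)
    (h : x ∈ pvCh ih y) : x ∈ pvU ih := by
  rw [pvCh_eq] at h
  cases hl : pvLookup ih y with
  | none => simp [hl] at h
  | some cs =>
    rw [hl] at h
    simp only [Option.getD_some] at h
    exact List.mem_flatMap.2 ⟨(y, cs), pvLookup_mem ih y cs hl, by simp [h]⟩

theorem pv_mem_exp (ih : List (String × List String)) (s : List String) (x : String) :
    x ∈ pvExp ih s ↔ x ∈ s ∨ ∃ y ∈ s, x ∈ pvCh ih y := by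
  simp [pvExp, List.mem_append, List.mem_flatMap]

theorem pv_sub_exp (ih : List (String × List String)) (s : List String) (x : String)
    (h : x ∈ s) : x ∈ pvExp ih s := (pv_mem_exp ih s x).2 (Or.inl h)

theorem pv_nodup_exp (ih : List (String × List String)) (s : List String) :
    (pvExp ih s).Nodup := PySem.List.nodup_dedup _

theorem pv_exp_congr (ih : List (String × List String)) (s t : List String)
    (h : ∀ x, x ∈ s ↔ x ∈ t) (x : String) : x ∈ pvExp ih s ↔ x ∈ pvExp ih t := by
  simp only [pv_mem_exp]
  constructor
  · rintro (hx | ⟨y, hy, hxy⟩)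
    · exact Or.inl ((h x).1 hx)
    · exact Or.inr ⟨y, (h y).1 hy, hxy⟩
  · rintro (hx | ⟨y, hy, hxy⟩)
    · exact Or.inl ((h x).2 hx)
    · exact Or.inr ⟨y, (h y).2 hy, hxy⟩

theorem pv_exp_sub_U (ih : List (String × List String)) (s : List String)
    (hs : ∀ x ∈ s, x ∈ pvU ih) : ∀ x ∈ pvExp ih s, x ∈ pvU ih := by
  intro x hx
  rcases (pv_mem_exp ih s x).1 hx with hx | ⟨y, _, hxy⟩
  · exact hs x hx
  · exact pv_ch_sub_U ih y x hxy

theorem pv_iter_nodup (ih : List (String × List String)) (m : Nat) (s : List String)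
    (hs : s.Nodup) : ((pvExp ih)^[m] s).Nodup := by
  cases m with
  | zero => exact hs
  | succ m => rw [Function.iterate_succ_apply']; exact pv_nodup_exp ih _

theorem pv_iter_sub_U (ih : List (String × List String)) (m : Nat) (s : List String)
    (hs : ∀ x ∈ s, x ∈ pvU ih) : ∀ x ∈ (pvExp ih)^[m] s, x ∈ pvU ih := by
  induction m with
  | zero => exact hs
  | succ m ihm => rw [Function.iterate_succ_apply']; exact pv_exp_sub_U ih _ ihm

theorem pv_iter_mono (ih : List (String × List String)) (m : Nat) (s : List String)
    (x : String) (h : x ∈ s) : x ∈ (pvExp ih)^[m] s := by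
  induction m with
  | zero => exact h
  | succ m ihm => rw [Function.iterate_succ_apply']; exact pv_sub_exp ih _ x ihm

theorem pv_len_le_N0 (ih : List (String × List String)) (s : List String)
    (hnd : s.Nodup) (hU : ∀ x ∈ s, x ∈ pvU ih) : s.length ≤ pvN0 ih := by
  calc s.length = s.toFinset.card := (List.toFinset_card_of_nodup hnd).symm
    _ ≤ (pvU ih).toFinset.card :=
        Finset.card_le_card (fun x hx => List.mem_toFinset.2 (hU x (List.mem_toFinset.1 hx)))
    _ ≤ (pvU ih).length := List.toFinset_card_le (pvU ih)
    _ = pvN0 ih := rfl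

theorem pv_exp_grow (ih : List (String × List String)) (s : List String)
    (hnd : s.Nodup) (hne : ∃ x ∈ pvExp ih s, x ∉ s) : s.length < (pvExp ih s).length := by
  obtain ⟨x, hxt, hxs⟩ := hne
  have h1 : s.toFinset ⊂ (pvExp ih s).toFinset := by
    constructor
    · intro y hy
      exact List.mem_toFinset.2 (pv_sub_exp ih s y (List.mem_toFinset.1 hy))
    · intro hcon
      exact hxs (List.mem_toFinset.1 (hcon (List.mem_toFinset.2 hxt)))
  calc s.length = s.toFinset.card := (List.toFinset_card_of_nodup hnd).symm
    _ < (pvExp ih s).toFinset.card := Finset.card_lt_card h1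
    _ = (pvExp ih s).length := List.toFinset_card_of_nodup (pv_nodup_exp ih s)

-- the fixpoint is reached after pvN0 + 1 expansion steps
theorem pv_stab_set (ih : List (String × List String)) (s : List String)
    (hnd : s.Nodup) (hU : ∀ x ∈ s, x ∈ pvU ih) (x : String) :
    x ∈ pvExp ih ((pvExp ih)^[pvN0 ih + 1] s) ↔ x ∈ (pvExp ih)^[pvN0 ih + 1] s := by
  have grow : ∀ i : Nat,
      (∃ j, j < i ∧ ∀ y, y ∈ pvExp ih ((pvExp ih)^[j] s) ↔ y ∈ (pvExp ih)^[j] s) ∨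
      i ≤ ((pvExp ih)^[i] s).length := by
    intro i
    induction i with
    | zero => exact Or.inr (Nat.zero_le _)
    | succ i ihi =>
      rcases ihi with ⟨j, hj, he⟩ | hlen
      · exact Or.inl ⟨j, Nat.lt_trans hj (Nat.lt_succ_self i), he⟩
      · by_cases hstab : ∀ y, y ∈ pvExp ih ((pvExp ih)^[i] s) ↔ y ∈ (pvExp ih)^[i] s
        · exact Or.inl ⟨i, Nat.lt_succ_self i, hstab⟩
        · right
          obtain ⟨y, hy⟩ := not_forall.1 hstab
          have hnew : ∃ z ∈ pvExp ih ((pvExp ih)^[i] s), z ∉ (pvExp ih)^[i] s := by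
            refine ⟨y, ?_, ?_⟩
            · by_cases hy2 : y ∈ (pvExp ih)^[i] s
              · exact pv_sub_exp ih _ y hy2
              · by_cases hy1 : y ∈ pvExp ih ((pvExp ih)^[i] s)
                · exact hy1
                · exact absurd (iff_of_false hy1 hy2) hy
            · intro hy2
              exact hy (iff_of_true (pv_sub_exp ih _ y hy2) hy2)
          have hlt := pv_exp_grow ih ((pvExp ih)^[i] s) (pv_iter_nodup ih i s hnd) hnew
          rw [Function.iterate_succ_apply']
          omega
  rcases grow (pvN0 ih + 2) with ⟨j, hj, he⟩ | hlen
  · have hjM : j ≤ pvN0 ih + 1 := by omega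
    have prop : ∀ m y, y ∈ (pvExp ih)^[j + m] s ↔ y ∈ (pvExp ih)^[j] s := by
      intro m
      induction m with
      | zero => intro y; rfl
      | succ m ihm =>
        intro y
        have : j + (m + 1) = (j + m) + 1 := by omega
        rw [this, Function.iterate_succ_apply']
        exact Iff.trans (pv_exp_congr ih _ _ ihm y) (he y)
    have hM : ∀ y, y ∈ (pvExp ih)^[pvN0 ih + 1] s ↔ y ∈ (pvExp ih)^[j] s := by
      intro y
      have hrw : j + (pvN0 ih + 1 - j) = pvN0 ih + 1 := by omega
      have := prop (pvN0 ih + 1 - j) y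
      rwa [hrw] at this
    exact Iff.trans (pv_exp_congr ih _ _ hM x)
      (Iff.trans (he x) (hM x).symm)
  · exfalso
    have := pv_len_le_N0 ih ((pvExp ih)^[pvN0 ih + 2] s)
      (pv_iter_nodup ih _ s hnd) (pv_iter_sub_U ih _ s hU)
    omega

theorem pv_reach_start_nodup (ih : List (String × List String)) (n : String) :
    (PySem.List.dedup (pvCh ih n)).Nodup := PySem.List.nodup_dedup _

theorem pv_reach_start_U (ih : List (String × List String)) (n : String) :
    ∀ x ∈ PySem.List.dedup (pvCh ih n), x ∈ pvU ih := by
  intro x hx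
  exact pv_ch_sub_U ih n x ((PySem.List.mem_dedup _ x).1 hx)

theorem pv_reach_closed (ih : List (String × List String)) (n c x : String)
    (hc : c ∈ pvReach ih n) (hx : x ∈ pvCh ih c) : x ∈ pvReach ih n := by
  have := (pv_stab_set ih (PySem.List.dedup (pvCh ih n)) (pv_reach_start_nodup ih n)
    (pv_reach_start_U ih n) x).1
  exact this ((pv_mem_exp ih _ x).2 (Or.inr ⟨c, hc, hx⟩))

theorem pv_ch_sub_reach (ih : List (String × List String)) (n c : String)
    (hc : c ∈ pvCh ih n) : c ∈ pvReach ih n :=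
  pv_iter_mono ih _ _ c ((PySem.List.mem_dedup _ c).2 hc)

theorem pv_reach_sub (ih : List (String × List String)) (n c : String)
    (hc : c ∈ pvCh ih n) : ∀ x ∈ pvReach ih c, x ∈ pvReach ih n := by
  have hcr : c ∈ pvReach ih n := pv_ch_sub_reach ih n c hc
  have step : ∀ s : List String, (∀ x ∈ s, x ∈ pvReach ih n) →
      ∀ x ∈ pvExp ih s, x ∈ pvReach ih n := by
    intro s hs x hx
    rcases (pv_mem_exp ih s x).1 hx with hx | ⟨y, hy, hxy⟩
    · exact hs x hx
    · exact pv_reach_closed ih n y x (hs y hy) hxy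
  have iter : ∀ m, ∀ x ∈ (pvExp ih)^[m] (PySem.List.dedup (pvCh ih c)), x ∈ pvReach ih n := by
    intro m
    induction m with
    | zero =>
      intro x hx
      exact pv_reach_closed ih n c x hcr ((PySem.List.mem_dedup _ x).1 hx)
    | succ m ihm =>
      rw [Function.iterate_succ_apply']
      exact step _ ihm
  exact iter (pvN0 ih + 1)

theorem pv_reach_nodup (ih : List (String × List String)) (n : String) :
    (pvReach ih n).Nodup := pv_iter_nodup ih _ _ (pv_reach_start_nodup ih n)

theorem pv_reach_sub_U (ih : List (String × List String)) (n : String) :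
    ∀ x ∈ pvReach ih n, x ∈ pvU ih :=
  pv_iter_sub_U ih _ _ (pv_reach_start_U ih n)

theorem pv_reach_len_le (ih : List (String × List String)) (n : String) :
    (pvReach ih n).length ≤ pvN0 ih :=
  pv_len_le_N0 ih _ (pv_reach_nodup ih n) (pv_reach_sub_U ih n)

theorem pv_reach_len_lt (ih : List (String × List String)) (n c : String)
    (hc : c ∈ pvCh ih n) (hcc : c ∉ pvReach ih c) :
    (pvReach ih c).length < (pvReach ih n).length := by
  have hsub := pv_reach_sub ih n c hc
  have hcr : c ∈ pvReach ih n := pv_ch_sub_reach ih n c hc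
  have h1 : (pvReach ih c).toFinset ⊂ (pvReach ih n).toFinset := by
    constructor
    · intro y hy
      exact List.mem_toFinset.2 (hsub y (List.mem_toFinset.1 hy))
    · intro hcon
      exact hcc (List.mem_toFinset.1 (hcon (List.mem_toFinset.2 hcr)))
  calc (pvReach ih c).length = (pvReach ih c).toFinset.card :=
        (List.toFinset_card_of_nodup (pv_reach_nodup ih c)).symm
    _ < (pvReach ih n).toFinset.card := Finset.card_lt_card h1
    _ = (pvReach ih n).length := List.toFinset_card_of_nodup (pv_reach_nodup ih n)

-- acyclicity hypothesis propagates to children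
theorem pv_acyc_child (ih : List (String × List String)) (n c : String)
    (hA : ∀ x ∈ pvReach ih n, x ∉ pvReach ih x) (hc : c ∈ pvCh ih n) :
    ∀ x ∈ pvReach ih c, x ∉ pvReach ih x :=
  fun x hx => hA x (pv_reach_sub ih n c hc x hx)

-- height is fuel-independent once the fuel exceeds the reach size
theorem pv_hf_stab (ih : List (String × List String)) (k : Nat) :
    ∀ (n : String) (f1 f2 : Nat),
      (∀ x ∈ pvReach ih n, x ∉ pvReach ih x) →
      (pvReach ih n).length < k → k ≤ f1 → k ≤ f2 →
      pvHf ih f1 n = pvHf ih f2 n := by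
  induction k with
  | zero => intro n f1 f2 _ hlen _ _; omega
  | succ k ihk =>
    intro n f1 f2 hA hlen h1 h2
    cases f1 with
    | zero => omega
    | succ a =>
      cases f2 with
      | zero => omega
      | succ b =>
        cases hl : pvLookup ih n with
        | none => simp only [pvHf, hl]
        | some cs =>
          simp only [pvHf, hl]
          apply PySem.List.foldl_congr_mem
          intro acc c hcm
          have hc' : c ∈ pvCh ih n := by rw [pvCh_eq, hl]; simpa
          have hcc : c ∉ pvReach ih c := hA c (pv_ch_sub_reach ih n c hc')
          have hlt := pv_reach_len_lt ih n c hc' hcc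
          have := ihk c a b (pv_acyc_child ih n c hA hc') (by omega) (by omega) (by omega)
          rw [this]

-- arithmetic bridge between A's depth-threading fold and the pure height fold
theorem pv_foldA (cs : List String) (g h : String → Int) (depth : Int) :
    ∀ (A B : Int), A = depth + B → (∀ c ∈ cs, g c = (depth + 1) + h c) →
      cs.foldl (fun md c => max md (g c)) A = depth + cs.foldl (fun a c => max a (1 + h c)) B := by
  induction cs with
  | nil => intro A B hAB _; simpa using hAB
  | cons c cs ihc =>
    intro A B hAB hg
    simp only [List.foldl_cons]
    apply ihc
    · rw [hg c (List.mem_cons_self), hAB]; omega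
    · intro c' hc'; exact hg c' (List.mem_cons_of_mem _ hc')

theorem pv_mainA (ih : List (String × List String)) (k : Nat) :
    ∀ (n : String) (depth : Int) (f : Nat),
      (∀ x ∈ pvReach ih n, x ∉ pvReach ih x) →
      (pvReach ih n).length < k → k ≤ f →
      pvGoA ih f n depth = depth + pvHf ih f n := by
  induction k with
  | zero => intro n depth f _ hlen _; omega
  | succ k ihk =>
    intro n depth f hA hlen hf
    cases f with
    | zero => omega
    | succ f' =>
      cases hl : pvLookup ih n with
      | none => simp only [pvGoA, pvHf, hl]; omega
      | some cs =>
        simp only [pvGoA, pvHf, hl]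
        apply pv_foldA cs _ _ depth depth 0 (by omega)
        intro c hcm
        have hc' : c ∈ pvCh ih n := by rw [pvCh_eq, hl]; simpa
        have hcc : c ∉ pvReach ih c := hA c (pv_ch_sub_reach ih n c hc')
        have hlt := pv_reach_len_lt ih n c hc' hcc
        exact ihk c (depth + 1) f' (pv_acyc_child ih n c hA hc') (by omega) (by omega)

-- memo invariant: every cached value is the true height
def pvInv (ih : List (String × List String)) (m : PySem.Dict String Int) : Prop :=
  ∀ kk v, m.get? kk = some v → v = pvHf ih (pvN0 ih + 1) kk

theorem pv_foldB (ih : List (String × List String)) (f : Nat) (cs : List String)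
    (hch : ∀ c ∈ cs, ∀ m, pvInv ih m →
      (pvHeightB ih f c m).1 = pvHf ih (pvN0 ih + 1) c ∧ pvInv ih (pvHeightB ih f c m).2) :
    ∀ (p : Int × PySem.Dict String Int), pvInv ih p.2 →
      (cs.foldl (fun acc c => let s := pvHeightB ih f c acc.2; (max acc.1 (1 + s.1), s.2)) p).1
        = cs.foldl (fun a c => max a (1 + pvHf ih (pvN0 ih + 1) c)) p.1
      ∧ pvInv ih (cs.foldl (fun acc c => let s := pvHeightB ih f c acc.2; (max acc.1 (1 + s.1), s.2)) p).2 := by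
  induction cs with
  | nil => intro p hp; exact ⟨rfl, hp⟩
  | cons c cs ihc =>
    intro p hp
    have hc := hch c (List.mem_cons_self) p.2 hp
    have hrec := ihc (fun c' hc' => hch c' (List.mem_cons_of_mem _ hc'))
      (max p.1 (1 + (pvHeightB ih f c p.2).1), (pvHeightB ih f c p.2).2) hc.2
    simp only [List.foldl_cons]
    constructor
    · rw [hrec.1, hc.1]
    · exact hrec.2

theorem pv_mainB (ih : List (String × List String)) (k : Nat) :
    ∀ (n : String) (f : Nat) (m : PySem.Dict String Int),
      (∀ x ∈ pvReach ih n, x ∉ pvReach ih x) →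
      (pvReach ih n).length < k → k ≤ f → pvInv ih m →
      (pvHeightB ih f n m).1 = pvHf ih (pvN0 ih + 1) n ∧ pvInv ih (pvHeightB ih f n m).2 := by
  induction k with
  | zero => intro n f m _ hlen _ _; omega
  | succ k ihk =>
    intro n f m hA hlen hf hInv
    cases f with
    | zero => omega
    | succ f' =>
      cases hm : m.get? n with
      | some cached =>
        simp only [pvHeightB, hm]
        exact ⟨hInv n cached hm, hInv⟩
      | none =>
        cases hl : pvLookup ih n with
        | none =>
          refine ⟨?_, ?_⟩ <;> simp only [pvHeightB, hm, hl, pvHf]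
          exact hInv
        | some cs =>
          have hch : ∀ c ∈ cs, ∀ m', pvInv ih m' →
              (pvHeightB ih f' c m').1 = pvHf ih (pvN0 ih + 1) c ∧
              pvInv ih (pvHeightB ih f' c m').2 := by
            intro c hcm m' hI
            have hc' : c ∈ pvCh ih n := by rw [pvCh_eq, hl]; simpa
            have hcc : c ∉ pvReach ih c := hA c (pv_ch_sub_reach ih n c hc')
            have hlt := pv_reach_len_lt ih n c hc' hcc
            exact ihk c f' m' (pv_acyc_child ih n c hA hc') (by omega) (by omega) hI
          have hfold := pv_foldB ih f' cs hch (0, m) hInv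
          have hval : (cs.foldl
              (fun acc c => let s := pvHeightB ih f' c acc.2; (max acc.1 (1 + s.1), s.2))
              (0, m)).1 = pvHf ih (pvN0 ih + 1) n := by
            simp only [pvHf, hl]
            rw [hfold.1]
            apply PySem.List.foldl_congr_mem
            intro acc c hcm
            have hc' : c ∈ pvCh ih n := by rw [pvCh_eq, hl]; simpa
            have hcc : c ∉ pvReach ih c := hA c (pv_ch_sub_reach ih n c hc')
            have hlt := pv_reach_len_lt ih n c hc' hcc
            have hle := pv_reach_len_le ih n
            have := pv_hf_stab ih ((pvReach ih c).length + 1) c (pvN0 ih + 1) (pvN0 ih)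
              (pv_acyc_child ih n c hA hc') (by omega) (by omega) (by omega)
            rw [this]
          simp only [pvHeightB, hm, hl]
          refine ⟨hval, ?_⟩
          intro kk v hkv
          rw [PySem.Dict.get?_insert] at hkv
          by_cases hkn : kk = n
          · simp only [hkn, reduceIte] at hkv
            rw [← Option.some_inj.1 hkv, hval, hkn]
          · simp only [if_neg hkn] at hkv
            exact hfold.2 kk v hkv

-- ===== VERDICT (by name: the statement is the Claim_ definition above) =====
theorem get_class_hierarchy_depth_spec : Claim_equal_get_class_hierarchy_depth := by
  intro cn ih depth _ hpre
  unfold Spec_get_class_hierarchy_depth get_class_hierarchy_depth get_class_hierarchy_depth_alt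
  have hA : ∀ x ∈ pvReach ih cn, x ∉ pvReach ih x := fun x hx => hpre x (List.mem_cons_of_mem _ hx)
  have hlen : (pvReach ih cn).length < (pvReach ih cn).length + 1 := Nat.lt_succ_self _
  have hle : (pvReach ih cn).length + 1 ≤ pvN0 ih + 1 :=
    Nat.succ_le_succ (pv_reach_len_le ih cn)
  have hAeq := pv_mainA ih ((pvReach ih cn).length + 1) cn depth (pvN0 ih + 1) hA hlen hle
  have hBeq := pv_mainB ih ((pvReach ih cn).length + 1) cn (pvN0 ih + 1) PySem.Dict.empty hA hlen hle
    (by intro kk v hkv; simp [PySem.Dict.get?_empty] at hkv)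
  show pvGoA ih (pvN0 ih + 1) cn depth = depth + (pvHeightB ih (pvN0 ih + 1) cn PySem.Dict.empty).1
  rw [hAeq, hBeq.1]
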